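-- pv_equiv track=rewrite | github.com/MicheleDelliVeneri/ALMASim | src/almasim/services/observation_plan.py | split_antenna_array_by_type
-- ===== SOURCE A (Python) =====
-- def split_antenna_array_by_type(antenna_array: str) -> list[tuple[str, str]]:
--     """Split a raw ALMA antenna-array string into inferred ALMA array groups."""
--     tokens = [token for token in str(antenna_array or "").split() if token.strip()]
--     groups: dict[str, list[str]] = {"12m": [], "7m": [], "TP": []}
--     for token in tokens:
--         upper = token.upper()
--         if "CM" in upper:
--             groups["7m"].append(token)
--         elif "PM" in upper:
--             groups["TP"].append(token)
--         else:
--             groups["12m"].append(token)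
--
--     ordered_groups: list[tuple[str, str]] = []
--     for array_type in ("12m", "7m", "TP"):
--         if groups[array_type]:
--             ordered_groups.append((array_type, " ".join(groups[array_type])))
--     return ordered_groups
-- ===== SOURCE B (Python) =====
-- def split_antenna_array_by_type(antenna_array: str) -> list[tuple[str, str]]:
--     """Three independent filter passes in output order instead of one grouping loop."""
--     tokens = [t for t in str(antenna_array or "").split() if t.strip()]
--     out: list[tuple[str, str]] = []
--     m12 = [t for t in tokens if "CM" not in t.upper() and "PM" not in t.upper()]
--     if m12:
--         out.append(("12m", " ".join(m12)))
--     m7 = [t for t in tokens if "CM" in t.upper()]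
--     if m7:
--         out.append(("7m", " ".join(m7)))
--     mtp = [t for t in tokens if "PM" in t.upper() and "CM" not in t.upper()]
--     if mtp:
--         out.append(("TP", " ".join(mtp)))
--     return out
-- ===== Notes on version B (the rewrite author's own statement) =====
-- stated objective: alternative
-- what changed: Replaces the single classifying loop over a mutable dict of groups with three independent filter passes over the token list, one per array type in output order.
import Mathlib
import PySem

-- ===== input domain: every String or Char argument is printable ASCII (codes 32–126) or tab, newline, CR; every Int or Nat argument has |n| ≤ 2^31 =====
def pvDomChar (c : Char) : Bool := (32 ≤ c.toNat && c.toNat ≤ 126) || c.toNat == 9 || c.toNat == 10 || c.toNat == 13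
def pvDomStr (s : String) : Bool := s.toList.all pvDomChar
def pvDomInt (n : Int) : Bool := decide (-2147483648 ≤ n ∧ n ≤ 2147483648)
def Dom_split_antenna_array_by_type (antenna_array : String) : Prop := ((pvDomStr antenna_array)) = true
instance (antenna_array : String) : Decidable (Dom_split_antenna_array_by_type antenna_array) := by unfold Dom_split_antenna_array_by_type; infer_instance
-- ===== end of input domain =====

-- B replaces A's single classifying loop over a mutable dict of groups by three
-- independent filter passes over the token list, one per array type in output order.

-- shared token predicates: "CM" in token.upper(), "PM" in token.upper()
def pvHasCM (t : String) : Bool := PySem.Str.isIn "CM" (PySem.Str.upper t)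
def pvHasPM (t : String) : Bool := PySem.Str.isIn "PM" (PySem.Str.upper t)

-- ===== PORT A =====
-- loop body of A's classifying pass (dict keys "12m"/"7m"/"TP" are always present,
-- so groups[k] / in-place append is exactly Dict.modify with any default)
def pvStepA (g : PySem.Dict String (List String)) (token : String) : PySem.Dict String (List String) :=
  let upper := PySem.Str.upper token
  if PySem.Str.isIn "CM" upper then g.modify "7m" [] (fun l => l ++ [token])
  else if PySem.Str.isIn "PM" upper then g.modify "TP" [] (fun l => l ++ [token])
  else g.modify "12m" [] (fun l => l ++ [token])

def split_antenna_array_by_type (antenna_array : String) : List (String × String) :=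
  -- str(antenna_array or "") on a str argument: "" if empty else the string itself
  let s := if antenna_array == "" then "" else antenna_array
  let tokens := (PySem.Str.split₀ s).filter (fun token => PySem.Str.strip token != "")
  let groups : PySem.Dict String (List String) := PySem.Dict.mk [("12m", []), ("7m", []), ("TP", [])]
  let groups := tokens.foldl pvStepA groups
  -- groups[array_type] is total here (the three keys are inserted up front): getD is exact
  ["12m", "7m", "TP"].foldl (fun acc array_type =>
    if (groups.getD array_type []) ≠ [] then
      acc ++ [(array_type, PySem.Str.join " " (groups.getD array_type []))]
    else acc) []

-- ===== PORT B =====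
def split_antenna_array_by_type_alt (antenna_array : String) : List (String × String) :=
  let s := if antenna_array == "" then "" else antenna_array
  let tokens := (PySem.Str.split₀ s).filter (fun t => PySem.Str.strip t != "")
  let m12 := tokens.filter (fun t => !pvHasCM t && !pvHasPM t)
  let m7 := tokens.filter (fun t => pvHasCM t)
  let mtp := tokens.filter (fun t => pvHasPM t && !pvHasCM t)
  (if m12 ≠ [] then [("12m", PySem.Str.join " " m12)] else []) ++
  (if m7 ≠ [] then [("7m", PySem.Str.join " " m7)] else []) ++
  (if mtp ≠ [] then [("TP", PySem.Str.join " " mtp)] else [])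

-- ===== PRECONDITION & SPEC =====
def Spec_split_antenna_array_by_type (antenna_array : String) (out : List (String × String)) : Prop := out = split_antenna_array_by_type_alt antenna_array
instance (antenna_array : String) (out : List (String × String)) : Decidable (Spec_split_antenna_array_by_type antenna_array out) := by unfold Spec_split_antenna_array_by_type; infer_instance

-- ===== CLAIM (what is proved, stated in full; the proofs are below) =====
def Claim_equal_split_antenna_array_by_type : Prop := ∀ (antenna_array : String), Dom_split_antenna_array_by_type antenna_array → Spec_split_antenna_array_by_type antenna_array (split_antenna_array_by_type antenna_array)

-- ===== LEMMAS AND PROOFS =====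

-- A's classifying fold leaves exactly the three filtered sublists in the dict.
theorem pv_fold_state (ts : List String) : ∀ a b c : List String,
    ts.foldl pvStepA (PySem.Dict.mk [("12m", a), ("7m", b), ("TP", c)])
      = PySem.Dict.mk [("12m", a ++ ts.filter (fun t => !pvHasCM t && !pvHasPM t)),
                       ("7m", b ++ ts.filter (fun t => pvHasCM t)),
                       ("TP", c ++ ts.filter (fun t => pvHasPM t && !pvHasCM t))] := by
  induction ts with
  | nil => simp
  | cons t ts ih =>
    intro a b c
    by_cases h1 : pvHasCM t = true
    · have step_eq : List.foldl pvStepA (PySem.Dict.mk [("12m", a), ("7m", b), ("TP", c)]) (t :: ts)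
          = List.foldl pvStepA (PySem.Dict.mk [("12m", a), ("7m", b ++ [t]), ("TP", c)]) ts := by
        simp only [List.foldl_cons]
        congr 1
        have h1' := h1; simp [pvHasCM] at h1'
        simp [pvStepA, PySem.Dict.modify, PySem.Dict.getD, PySem.Dict.insert, PySem.Dict.get?, h1']
      rw [step_eq, ih]
      simp [h1]
    · by_cases h2 : pvHasPM t = true
      · have step_eq : List.foldl pvStepA (PySem.Dict.mk [("12m", a), ("7m", b), ("TP", c)]) (t :: ts)
            = List.foldl pvStepA (PySem.Dict.mk [("12m", a), ("7m", b), ("TP", c ++ [t])]) ts := by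
          simp only [List.foldl_cons]
          congr 1
          have h1' := h1; have h2' := h2; simp [pvHasCM] at h1'; simp [pvHasPM] at h2'
          simp [pvStepA, PySem.Dict.modify, PySem.Dict.getD, PySem.Dict.insert, PySem.Dict.get?, h1', h2']
        rw [step_eq, ih]
        simp [h1, h2]
      · have step_eq : List.foldl pvStepA (PySem.Dict.mk [("12m", a), ("7m", b), ("TP", c)]) (t :: ts)
            = List.foldl pvStepA (PySem.Dict.mk [("12m", a ++ [t]), ("7m", b), ("TP", c)]) ts := by
          simp only [List.foldl_cons]
          congr 1
          have h1' := h1; have h2' := h2; simp [pvHasCM] at h1'; simp [pvHasPM] at h2'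
          simp [pvStepA, PySem.Dict.modify, PySem.Dict.getD, PySem.Dict.insert, PySem.Dict.get?, h1', h2']
        rw [step_eq, ih]
        simp [h1, h2]

-- ===== VERDICT (by name: the statement is the Claim_ definition above) =====
theorem split_antenna_array_by_type_spec : Claim_equal_split_antenna_array_by_type := by
  intro antenna_array _
  unfold Spec_split_antenna_array_by_type
  simp only [split_antenna_array_by_type, split_antenna_array_by_type_alt, pv_fold_state,
    List.nil_append]
  simp only [List.foldl_cons, List.foldl_nil, List.nil_append]
  simp [PySem.Dict.getD, PySem.Dict.get?]
  split_ifs <;> simp
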